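-- pv_equiv track=rewrite | github.com/Thernn88/SAPPHYRE | phymmr/flexcull.py | align_col_removal
-- ===== SOURCE A (Python) =====
-- from itertools import chain
--
-- def align_col_removal(raw_fed_sequences: list, positions_to_keep: list) -> list:
--     """
--     Iterates over each sequence and deletes columns
--     that were removed in the empty column removal.
--     """
--     # raw_sequences = [
--     #     i.replace("\n", "") for i in raw_fed_sequences if i.replace("\n", "") != ""
--     # ]
--
--     result = []
--     raw_sequences = [*chain.from_iterable(raw_fed_sequences)]
--     for i in range(0, len(raw_sequences), 2):
--         # result.append(raw_sequences[i])
--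
--         sequence = raw_sequences[i + 1]
--
--         sequence = [sequence[i * 3 : (i * 3) + 3] for i in positions_to_keep]
--         x = "".join(sequence)
--         result.append((raw_sequences[i], "".join(sequence)))
--
--     return result
-- ===== SOURCE B (Python) =====
-- def align_col_removal(raw_fed_sequences: list, positions_to_keep: list) -> list:
--     """
--     Column-major variant: pair up headers and sequences, compute each kept codon
--     column across all sequences, then assemble every row from the columns.
--     """
--     flat = [s for group in raw_fed_sequences for s in group]
--     pairs = [(flat[k], flat[k + 1]) for k in range(0, len(flat), 2)]
--     columns = [
--         [sequence[3 * p : 3 * p + 3] for _, sequence in pairs]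
--         for p in positions_to_keep
--     ]
--     return [
--         (header, "".join(col[i] for col in columns))
--         for i, (header, _) in enumerate(pairs)
--     ]
-- ===== Notes on version B (the rewrite author's own statement) =====
-- stated objective: alternative
-- what changed: A walks the header/sequence pairs and, per pair, slices the sequence at every kept position and joins; B pairs the flattened list first, computes one codon column per kept position across all sequences, and assembles each output row from those columns (loop interchange). Pre_ excludes only inputs with an odd number of flattened strings, where both A and B raise IndexError on the dangling header.
import Mathlib
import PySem

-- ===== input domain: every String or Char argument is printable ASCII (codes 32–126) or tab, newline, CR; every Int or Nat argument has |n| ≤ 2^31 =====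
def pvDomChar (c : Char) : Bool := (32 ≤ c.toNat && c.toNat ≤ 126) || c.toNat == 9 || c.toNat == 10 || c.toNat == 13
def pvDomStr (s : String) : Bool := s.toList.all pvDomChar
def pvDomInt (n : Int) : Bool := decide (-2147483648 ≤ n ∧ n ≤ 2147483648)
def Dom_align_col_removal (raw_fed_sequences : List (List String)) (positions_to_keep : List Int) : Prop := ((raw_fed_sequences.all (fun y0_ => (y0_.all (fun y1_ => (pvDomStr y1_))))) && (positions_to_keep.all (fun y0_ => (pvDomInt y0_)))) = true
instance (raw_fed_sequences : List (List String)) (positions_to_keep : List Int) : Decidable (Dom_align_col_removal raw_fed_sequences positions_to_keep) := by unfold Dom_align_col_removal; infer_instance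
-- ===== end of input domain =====

-- B pairs headers with sequences first, computes each kept codon column across all
-- sequences, and assembles every row from those columns — a column-major
-- decomposition of A's row-major loop (objective: alternative, not faster).

-- ===== PORT A =====
-- literal transliteration of A: flatten, walk indices 0,2,4,…, slice per position, join
def align_col_removal (raw_fed_sequences : List (List String)) (positions_to_keep : List Int) : List (String × String) :=
  let raw_sequences := raw_fed_sequences.flatten
  (PySem.List.pyRange 0 (raw_sequences.length : Int) 2).foldl
    (fun result i =>
      let sequence := PySem.List.pyGetD raw_sequences (i + 1) ""   -- raw_sequences[i+1]; raises only outside Pre_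
      let sequence' := positions_to_keep.map
        (fun i' => PySem.Str.slice sequence (some (i' * 3)) (some (i' * 3 + 3)))
      result ++ [(PySem.List.pyGetD raw_sequences i "", PySem.Str.join "" sequence')])
    []

-- ===== PORT B =====
-- literal transliteration of B: flatten, pair up, one codon column per kept
-- position, then assemble each row from the columns
def align_col_removal_alt (raw_fed_sequences : List (List String)) (positions_to_keep : List Int) : List (String × String) :=
  let flat := raw_fed_sequences.flatten
  let pairs := (PySem.List.pyRange 0 (flat.length : Int) 2).map
    (fun k => (PySem.List.pyGetD flat k "", PySem.List.pyGetD flat (k + 1) ""))   -- flat[k+1]; raises only outside Pre_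
  let columns := positions_to_keep.map
    (fun p => pairs.map (fun hs => PySem.Str.slice hs.2 (some (3 * p)) (some (3 * p + 3))))
  (PySem.List.enumerate pairs 0).map
    (fun ipair => (ipair.2.1, PySem.Str.join "" (columns.map (fun col => PySem.List.pyGetD col ipair.1 ""))))

-- ===== PRECONDITION & SPEC =====
-- Pre_ excludes exactly the inputs where A raises IndexError: an odd number of
-- flattened strings (the last header has no sequence line after it); B raises there too.
def Pre_align_col_removal (raw_fed_sequences : List (List String)) (positions_to_keep : List Int) : Prop :=
  raw_fed_sequences.flatten.length % 2 = 0
instance (raw_fed_sequences : List (List String)) (positions_to_keep : List Int) : Decidable (Pre_align_col_removal raw_fed_sequences positions_to_keep) := by unfold Pre_align_col_removal; infer_instance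

def pvWitness_align_col_removal : List (List String) × List Int := ([["h", "ABCDEF"]], [0, 1])

def Spec_align_col_removal (raw_fed_sequences : List (List String)) (positions_to_keep : List Int) (out : List (String × String)) : Prop := out = align_col_removal_alt raw_fed_sequences positions_to_keep
instance (raw_fed_sequences : List (List String)) (positions_to_keep : List Int) (out : List (String × String)) : Decidable (Spec_align_col_removal raw_fed_sequences positions_to_keep out) := by unfold Spec_align_col_removal; infer_instance

-- ===== CLAIM (what is proved, stated in full; the proofs are below) =====
def Claim_equal_align_col_removal : Prop := ∀ (raw_fed_sequences : List (List String)) (positions_to_keep : List Int), Dom_align_col_removal raw_fed_sequences positions_to_keep → Pre_align_col_removal raw_fed_sequences positions_to_keep → Spec_align_col_removal raw_fed_sequences positions_to_keep (align_col_removal raw_fed_sequences positions_to_keep)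

-- ===== LEMMAS AND PROOFS =====

theorem flatMap_singleton_eq_map {α β : Type} (g : α → β) (l : List α) :
    l.flatMap (fun x => [g x]) = l.map g := by
  induction l with
  | nil => rfl
  | cons x xs ih => simp [List.flatMap_cons, ih]

-- indexing a mapped range at an in-range Int position
theorem pyGetD_map_range {β : Type} (f : Nat → β) (m j : Nat) (d : β) (hj : j < m) :
    PySem.List.pyGetD ((List.range m).map f) ((j : Nat) : Int) d = f j := by
  rw [PySem.List.pyGetD_natCast]
  exact PySem.List.getD_map_range f m j d hj

-- the equivalence on the raw ports (loop interchange: row-major A = column-major B)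
theorem ports_eq (raw_fed_sequences : List (List String)) (positions_to_keep : List Int) :
    align_col_removal raw_fed_sequences positions_to_keep
      = align_col_removal_alt raw_fed_sequences positions_to_keep := by
  unfold align_col_removal align_col_removal_alt
  set flat := raw_fed_sequences.flatten with hflat
  set L := flat.length with hL
  simp only [PySem.List.foldl_append_eq_flatMap, List.nil_append, flatMap_singleton_eq_map]
  rw [PySem.List.enumerate_eq_map_pyRange _ ("", "")]
  rw [PySem.List.pyRange_of_pos 0 (L : Int) (by norm_num : (0 : Int) < 2)]
  set C := (if (0 : Int) < (L : Int) then (((L : Int) - 0 + 2 - 1) / 2).toNat else 0) with hC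
  simp only [List.map_map, List.length_map, List.length_range, PySem.List.len_eq]
  rw [PySem.List.pyRange_one, List.map_map]
  have hCC : (((C : Nat) : Int) - 0).toNat = C := by omega
  rw [hCC]
  apply List.map_congr_left
  intro j hj
  have hjC : j < C := List.mem_range.mp hj
  simp only [Function.comp_apply]
  have hz : (0 : Int) + (j : Nat) = ((j : Nat) : Int) := by ring
  rw [hz]
  rw [pyGetD_map_range _ C j ("", "") hjC]
  refine congrArg₂ Prod.mk rfl ?_
  refine congrArg (PySem.Str.join "") ?_
  apply List.map_congr_left
  intro p _
  simp only [Function.comp_apply]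
  rw [pyGetD_map_range _ C j "" hjC]
  simp only [Function.comp_apply]
  have h1 : (3 : Int) * p = p * 3 := by ring
  rw [h1]

-- ===== VERDICT (by name: the statement is the Claim_ definition above) =====
theorem align_col_removal_spec : Claim_equal_align_col_removal := by
  intro raw pos _ _
  unfold Spec_align_col_removal
  exact ports_eq raw pos
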